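-- pv_equiv track=rewrite | github.com/lucasXiaofan/cs520_exercise2 | exercise1_multi_solution_variants/problem_6.py | containsCycle_gemini_self_planning
-- ===== SOURCE A (Python) =====
-- from typing import List
--
-- def containsCycle_gemini_self_planning(grid: List[List[str]]) -> bool:
--     m = len(grid)
--     n = len(grid[0])
--     visited = set()
--
--     def dfs(row, col, parent_row, parent_col, start_row, start_col):
--         if (row, col) in visited:
--             return True
--
--         visited.add((row, col))
--
--         # Explore neighbors
--         directions = [(0, 1), (0, -1), (1, 0), (-1, 0)]
--         for dr, dc in directions:
--             new_row = row + dr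
--             new_col = col + dc
--
--             if 0 <= new_row < m and 0 <= new_col < n and grid[new_row][new_col] == grid[row][col] and (new_row, new_col) != (parent_row, parent_col):
--                 if dfs(new_row, new_col, row, col, start_row, start_col):
--                     return True
--
--         return False
--
--     for i in range(m):
--         for j in range(n):
--             if (i, j) not in visited:
--                 if dfs(i, j, -1, -1, i, j):
--                     return True
--
--     return False
-- ===== SOURCE B (Python) =====
-- from typing import List
--
-- # Iterative DFS with an explicit frame stack (no recursion): each frame keeps
-- # the cell, its DFS parent and the directions not yet explored.
-- def containsCycle_gemini_self_planning(grid: List[List[str]]) -> bool: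
--     m = len(grid)
--     n = len(grid[0])
--     directions = [(0, 1), (0, -1), (1, 0), (-1, 0)]
--     visited = set()
--     for i in range(m):
--         for j in range(n):
--             if (i, j) in visited:
--                 continue
--             visited.add((i, j))
--             stack = [(i, j, -1, -1, directions)]
--             while stack:
--                 r, c, pr, pc, ds = stack.pop()
--                 if not ds:
--                     continue
--                 (dr, dc), rest = ds[0], ds[1:]
--                 stack.append((r, c, pr, pc, rest))
--                 nr, nc = r + dr, c + dc
--                 if 0 <= nr < m and 0 <= nc < n and grid[nr][nc] == grid[r][c] and (nr, nc) != (pr, pc):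
--                     if (nr, nc) in visited:
--                         return True
--                     visited.add((nr, nc))
--                     stack.append((nr, nc, r, c, directions))
--     return False
-- ===== Notes on version B (the rewrite author's own statement) =====
-- stated objective: alternative
-- what changed: The nested recursive DFS with a shared mutable visited set is replaced by an iterative DFS over an explicit stack of frames (cell, parent, remaining directions), eliminating recursion (and Python recursion-depth limits) while visiting cells in the identical order.
-- outside the precondition, e.g. on containsCycle_gemini_self_planning([]): A raises IndexError, B raises IndexError; on containsCycle_gemini_self_planning([['a'], []]): A raises IndexError, B raises IndexError; on containsCycle_gemini_self_planning([['a', 'a'], ['a', 'a'], ['b']]): A returns True, B returns True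
import Mathlib
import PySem

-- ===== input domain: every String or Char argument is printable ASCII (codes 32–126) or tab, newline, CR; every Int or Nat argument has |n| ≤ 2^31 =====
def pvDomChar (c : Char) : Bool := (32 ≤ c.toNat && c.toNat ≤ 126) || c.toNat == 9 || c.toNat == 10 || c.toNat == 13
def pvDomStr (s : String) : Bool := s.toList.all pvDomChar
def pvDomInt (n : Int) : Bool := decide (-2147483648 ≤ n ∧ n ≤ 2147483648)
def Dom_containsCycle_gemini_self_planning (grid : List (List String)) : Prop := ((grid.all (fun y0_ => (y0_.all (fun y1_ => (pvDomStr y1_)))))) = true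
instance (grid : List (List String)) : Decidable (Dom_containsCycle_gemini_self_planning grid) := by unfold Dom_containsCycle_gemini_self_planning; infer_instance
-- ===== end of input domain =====

-- B replaces A's nested recursive DFS (shared mutable visited set) by an iterative DFS
-- over an explicit stack of (cell, parent, remaining-directions) frames, visiting cells
-- in the identical order; alternative decomposition, same asymptotic cost.
-- Both ports carry a fuel argument that only makes the recursion total (A: recursion
-- depth; B: loop steps, plus a per-frame depth budget); with the values chosen in the
-- entry points it is never exhausted on an admitted input.

-- ===== PORT A =====
def pvCell (grid : List (List String)) (r c : Int) : String :=
  PySem.List.pyGetD (PySem.List.pyGetD grid r []) c ""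
def pvDirs : List (Int × Int) := [(0, 1), (0, -1), (1, 0), (-1, 0)]
def pvGuard (grid : List (List String)) (m n r c pr pc dr dc : Int) : Bool :=
  decide (0 ≤ r + dr) && decide (r + dr < m) && decide (0 ≤ c + dc) && decide (c + dc < n) &&
    (pvCell grid (r + dr) (c + dc) == pvCell grid r c) && !(decide ((r + dr, c + dc) = (pr, pc)))

-- one iteration of dfs's 'for dr, dc in directions' loop, with the recursive call abstracted
def pvStepF (grid : List (List String)) (m n : Int)
    (dfs : PySem.Set (Int × Int) → Int → Int → Int → Int → Bool × PySem.Set (Int × Int))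
    (r c pr pc : Int) (acc : Bool × PySem.Set (Int × Int)) (d : Int × Int) :
    Bool × PySem.Set (Int × Int) :=
  if acc.1 then acc
  else if pvGuard grid m n r c pr pc d.1 d.2 then dfs acc.2 (r + d.1) (c + d.2) r c
  else acc

def pvDfsA (grid : List (List String)) (m n : Int) :
    Nat → PySem.Set (Int × Int) → Int → Int → Int → Int → Bool × PySem.Set (Int × Int)
  | 0, vis, _, _, _, _ => (false, vis)
  | f + 1, vis, r, c, pr, pc =>
    if PySem.Set.contains vis (r, c) then (true, vis)
    else
      pvDirs.foldl
        (pvStepF grid m n (fun v x y px py => pvDfsA grid m n f v x y px py) r c pr pc)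
        (false, PySem.Set.add vis (r, c))

def pvLoopJA (grid : List (List String)) (m n : Int) (F : Nat) (i : Int) :
    PySem.Set (Int × Int) → List Int → Bool × PySem.Set (Int × Int)
  | vis, [] => (false, vis)
  | vis, j :: js =>
    if PySem.Set.contains vis (i, j) then pvLoopJA grid m n F i vis js
    else
      let t := pvDfsA grid m n F vis i j (-1) (-1)
      if t.1 then (true, t.2) else pvLoopJA grid m n F i t.2 js

def pvLoopIA (grid : List (List String)) (m n : Int) (F : Nat) :
    PySem.Set (Int × Int) → List Int → Bool × PySem.Set (Int × Int)
  | vis, [] => (false, vis)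
  | vis, i :: is_ =>
    let t := pvLoopJA grid m n F i vis (PySem.List.pyRange 0 n 1)
    if t.1 then (true, t.2) else pvLoopIA grid m n F t.2 is_

def containsCycle_gemini_self_planning (grid : List (List String)) : Bool :=
  let m : Int := grid.length
  let n : Int := (grid.headD []).length
  (pvLoopIA grid m n (grid.length * (grid.headD []).length + 1)
    PySem.Set.empty (PySem.List.pyRange 0 m 1)).1

-- ===== PORT B =====
def pvRunB (grid : List (List String)) (m n : Int) :
    Nat → PySem.Set (Int × Int) → List (Nat × Int × Int × Int × Int × List (Int × Int)) →
      Bool × PySem.Set (Int × Int)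
  | _, vis, [] => (false, vis)
  | 0, vis, _ :: _ => (false, vis)
  | g + 1, vis, (_, _, _, _, _, []) :: stk => pvRunB grid m n g vis stk
  | g + 1, vis, (0, r, c, pr, pc, _ :: ds) :: stk =>
    pvRunB grid m n g vis ((0, r, c, pr, pc, ds) :: stk)
  | g + 1, vis, (fx + 1, r, c, pr, pc, (dr, dc) :: ds) :: stk =>
    if pvGuard grid m n r c pr pc dr dc then
      if PySem.Set.contains vis (r + dr, c + dc) then (true, vis)
      else
        pvRunB grid m n g (PySem.Set.add vis (r + dr, c + dc))
          ((fx, r + dr, c + dc, r, c, pvDirs) :: (fx + 1, r, c, pr, pc, ds) :: stk)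
    else pvRunB grid m n g vis ((fx + 1, r, c, pr, pc, ds) :: stk)

def pvLoopJB (grid : List (List String)) (m n : Int) (F G : Nat) (i : Int) :
    PySem.Set (Int × Int) → List Int → Bool × PySem.Set (Int × Int)
  | vis, [] => (false, vis)
  | vis, j :: js =>
    if PySem.Set.contains vis (i, j) then pvLoopJB grid m n F G i vis js
    else
      let t := pvRunB grid m n G (PySem.Set.add vis (i, j)) [(F, i, j, -1, -1, pvDirs)]
      if t.1 then (true, t.2) else pvLoopJB grid m n F G i t.2 js

def pvLoopIB (grid : List (List String)) (m n : Int) (F G : Nat) :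
    PySem.Set (Int × Int) → List Int → Bool × PySem.Set (Int × Int)
  | vis, [] => (false, vis)
  | vis, i :: is_ =>
    let t := pvLoopJB grid m n F G i vis (PySem.List.pyRange 0 n 1)
    if t.1 then (true, t.2) else pvLoopIB grid m n F G t.2 is_

def containsCycle_gemini_self_planning_alt (grid : List (List String)) : Bool :=
  let m : Int := grid.length
  let n : Int := (grid.headD []).length
  (pvLoopIB grid m n (grid.length * (grid.headD []).length)
    (5 * 6 ^ (grid.length * (grid.headD []).length))
    PySem.Set.empty (PySem.List.pyRange 0 m 1)).1

-- ===== PRECONDITION & SPEC =====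
-- Pre_ excludes the empty grid, on which A raises IndexError at len(grid[0]), and grids
-- with a row shorter than row 0, on which A's guarded neighbour accesses generally raise
-- IndexError (in the rare case such a grid returns before reaching the short row, B
-- returns the same value; see claim.json cites).
def Pre_containsCycle_gemini_self_planning (grid : List (List String)) : Prop :=
  grid ≠ [] ∧ ∀ row ∈ grid, (grid.headD []).length ≤ row.length
instance (grid : List (List String)) : Decidable (Pre_containsCycle_gemini_self_planning grid) := by
  unfold Pre_containsCycle_gemini_self_planning; infer_instance

def pvWitness_containsCycle_gemini_self_planning : List (List String) := [["a"]]

def Spec_containsCycle_gemini_self_planning (grid : List (List String)) (out : Bool) : Prop := out = containsCycle_gemini_self_planning_alt grid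
instance (grid : List (List String)) (out : Bool) : Decidable (Spec_containsCycle_gemini_self_planning grid out) := by unfold Spec_containsCycle_gemini_self_planning; infer_instance

-- ===== CLAIM (what is proved, stated in full; the proofs are below) =====
def Claim_equal_containsCycle_gemini_self_planning : Prop := ∀ (grid : List (List String)), Dom_containsCycle_gemini_self_planning grid → Pre_containsCycle_gemini_self_planning grid → Spec_containsCycle_gemini_self_planning grid (containsCycle_gemini_self_planning grid)

-- ===== LEMMAS AND PROOFS =====

def pvWeight (stk : List (Nat × Int × Int × Int × Int × List (Int × Int))) : Nat :=
  (stk.map (fun fr => (fr.2.2.2.2.2.length + 1) * 6 ^ fr.1)).sum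

def pvRunSpec (grid : List (List String)) (m n : Int) :
    PySem.Set (Int × Int) → List (Nat × Int × Int × Int × Int × List (Int × Int)) →
      Bool × PySem.Set (Int × Int)
  | vis, [] => (false, vis)
  | vis, (f, r, c, pr, pc, ds) :: stk =>
    let t := ds.foldl
      (pvStepF grid m n (fun v x y px py => pvDfsA grid m n f v x y px py) r c pr pc)
      (false, vis)
    if t.1 then (true, t.2) else pvRunSpec grid m n t.2 stk

theorem pvFold_true (grid : List (List String)) (m n : Int)
    (dfs : PySem.Set (Int × Int) → Int → Int → Int → Int → Bool × PySem.Set (Int × Int))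
    (r c pr pc : Int) (ds : List (Int × Int)) (v : PySem.Set (Int × Int)) :
    ds.foldl (pvStepF grid m n dfs r c pr pc) (true, v) = (true, v) := by
  induction ds with
  | nil => rfl
  | cons d ds ih => simpa [pvStepF] using ih

theorem pvStepF_false (grid : List (List String)) (m n : Int)
    (dfs : PySem.Set (Int × Int) → Int → Int → Int → Int → Bool × PySem.Set (Int × Int))
    (r c pr pc : Int) (v : PySem.Set (Int × Int)) (d : Int × Int) :
    pvStepF grid m n dfs r c pr pc (false, v) d =
      if pvGuard grid m n r c pr pc d.1 d.2 then dfs v (r + d.1) (c + d.2) r c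
      else (false, v) := by
  simp [pvStepF]

theorem pvRunB_eq_spec (grid : List (List String)) (m n : Int) :
    ∀ (g : Nat) (vis : PySem.Set (Int × Int))
      (stk : List (Nat × Int × Int × Int × Int × List (Int × Int))),
      pvWeight stk ≤ g → pvRunB grid m n g vis stk = pvRunSpec grid m n vis stk := by
  intro g
  induction g with
  | zero =>
      intro vis stk hw
      match stk with
      | [] => rfl
      | (f, r, c, pr, pc, ds) :: stk =>
          exfalso
          have h6 : 0 < 6 ^ f := Nat.pow_pos (by norm_num)
          have hge : 1 * 6 ^ f ≤ (ds.length + 1) * 6 ^ f :=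
            Nat.mul_le_mul_right _ (by omega)
          simp only [pvWeight, List.map_cons, List.sum_cons] at hw
          omega
  | succ g ih =>
      intro vis stk hw
      match stk with
      | [] => rfl
      | (f, r, c, pr, pc, []) :: stk =>
          have h6 : 0 < 6 ^ f := Nat.pow_pos (by norm_num)
          have hw' : pvWeight stk ≤ g := by
            simp only [pvWeight, List.map_cons, List.sum_cons, List.length_nil] at hw ⊢
            omega
          simp only [pvRunB]
          rw [ih vis stk hw']
          simp [pvRunSpec]
      | (0, r, c, pr, pc, (dr, dc) :: ds) :: stk =>
          have hw' : pvWeight ((0, r, c, pr, pc, ds) :: stk) ≤ g := by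
            have hsplit : (ds.length + 1 + 1) * 6 ^ (0 : Nat) = (ds.length + 1) * 6 ^ (0 : Nat) + 1 := by
              ring
            simp only [pvWeight, List.map_cons, List.sum_cons, List.length_cons, pow_zero, Nat.mul_one] at hw ⊢
            omega
          simp only [pvRunB]
          rw [ih _ _ hw']
          simp only [pvRunSpec, List.foldl_cons, pvStepF_false]
          by_cases hg : pvGuard grid m n r c pr pc dr dc = true
          · simp only [hg, if_pos]
            simp [pvDfsA]
          · simp [hg]
      | (fx + 1, r, c, pr, pc, (dr, dc) :: ds) :: stk =>
          have h6x : 0 < 6 ^ fx := Nat.pow_pos (by norm_num)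
          simp only [pvRunB]
          by_cases hg : pvGuard grid m n r c pr pc dr dc = true
          · rw [if_pos hg]
            by_cases hv : PySem.Set.contains vis (r + dr, c + dc) = true
            · rw [if_pos hv]
              simp only [pvRunSpec, List.foldl_cons, pvStepF_false, hg, if_pos]
              conv_rhs => rw [pvDfsA]
              simp only [hv, if_pos]
              rw [pvFold_true]
              simp
            · rw [if_neg hv]
              have hw' : pvWeight ((fx, r + dr, c + dc, r, c, pvDirs) ::
                  (fx + 1, r, c, pr, pc, ds) :: stk) ≤ g := by
                have hsplit : (ds.length + 1 + 1) * 6 ^ (fx + 1) =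
                    (ds.length + 1) * 6 ^ (fx + 1) + 5 * 6 ^ fx + 6 ^ fx := by
                  rw [pow_succ]; ring
                simp only [pvWeight, List.map_cons, List.sum_cons, pvDirs,
                  List.length_cons, List.length_nil] at hw ⊢
                omega
              rw [ih _ _ hw']
              simp only [pvRunSpec, List.foldl_cons, pvStepF_false, hg, if_pos]
              conv_rhs => rw [pvDfsA]
              simp only [hv, Bool.false_eq_true, if_false]
              rcases h1 : pvDirs.foldl
                  (pvStepF grid m n
                    (fun v x y px py => pvDfsA grid m n fx v x y px py) (r + dr) (c + dc) r c)
                  (false, PySem.Set.add vis (r + dr, c + dc)) with ⟨b1, v1⟩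
              cases b1 with
              | true => rw [pvFold_true]; simp
              | false => simp
          · rw [if_neg hg]
            have hw' : pvWeight ((fx + 1, r, c, pr, pc, ds) :: stk) ≤ g := by
              have hsplit : (ds.length + 1 + 1) * 6 ^ (fx + 1) =
                  (ds.length + 1) * 6 ^ (fx + 1) + 6 * 6 ^ fx := by
                rw [pow_succ]; ring
              simp only [pvWeight, List.map_cons, List.sum_cons, List.length_cons] at hw ⊢
              omega
            rw [ih _ _ hw']
            simp only [pvRunSpec, List.foldl_cons, pvStepF_false]
            simp [hg]

theorem pvRoot_eq (grid : List (List String)) (m n : Int) (F : Nat)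
    (vis : PySem.Set (Int × Int)) (i j : Int)
    (h : ¬ PySem.Set.contains vis (i, j) = true) :
    pvDfsA grid m n (F + 1) vis i j (-1) (-1) =
      pvRunB grid m n (5 * 6 ^ F) (PySem.Set.add vis (i, j)) [(F, i, j, -1, -1, pvDirs)] := by
  rw [pvRunB_eq_spec grid m n _ _ _ (by simp [pvWeight, pvDirs])]
  rw [pvDfsA]
  rw [if_neg h]
  simp only [pvRunSpec]
  rcases h1 : pvDirs.foldl
      (pvStepF grid m n (fun v x y px py => pvDfsA grid m n F v x y px py) i j (-1) (-1))
      (false, PySem.Set.add vis (i, j)) with ⟨b1, v1⟩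
  cases b1 with
  | true => simp
  | false => simp

theorem pvLoopJ_eq (grid : List (List String)) (m n : Int) (F : Nat) (i : Int)
    (js : List Int) (vis : PySem.Set (Int × Int)) :
    pvLoopJA grid m n (F + 1) i vis js = pvLoopJB grid m n F (5 * 6 ^ F) i vis js := by
  induction js generalizing vis with
  | nil => rfl
  | cons j js ih =>
      simp only [pvLoopJA, pvLoopJB]
      by_cases h : PySem.Set.contains vis (i, j) = true
      · have h2 : (i, j) ∈ vis := by simpa using h
        simp [h2, ih]
      · rw [if_neg h, if_neg h, ← pvRoot_eq grid m n F vis i j h]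
        rcases hd : pvDfsA grid m n (F + 1) vis i j (-1) (-1) with ⟨b, v⟩
        cases b <;> simp [ih]

theorem pvLoopI_eq (grid : List (List String)) (m n : Int) (F : Nat)
    (is_ : List Int) (vis : PySem.Set (Int × Int)) :
    pvLoopIA grid m n (F + 1) vis is_ = pvLoopIB grid m n F (5 * 6 ^ F) vis is_ := by
  induction is_ generalizing vis with
  | nil => rfl
  | cons i is_ ih =>
      simp only [pvLoopIA, pvLoopIB, pvLoopJ_eq]
      rcases h : pvLoopJB grid m n F (5 * 6 ^ F) i vis (PySem.List.pyRange 0 n 1) with ⟨b, v⟩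
      cases b <;> simp [ih]

theorem pv_main (grid : List (List String)) :
    containsCycle_gemini_self_planning grid = containsCycle_gemini_self_planning_alt grid := by
  exact congrArg Prod.fst (pvLoopI_eq grid grid.length (grid.headD []).length
    (grid.length * (grid.headD []).length) (PySem.List.pyRange 0 grid.length 1) PySem.Set.empty)

-- ===== VERDICT (by name: the statement is the Claim_ definition above) =====
theorem containsCycle_gemini_self_planning_spec : Claim_equal_containsCycle_gemini_self_planning := by
  intro grid _ _
  unfold Spec_containsCycle_gemini_self_planning
  exact pv_main grid
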